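-- pv_equiv track=rewrite | github.com/sh499y/sortowania | heapsort.py | v_ksztaltna
-- ===== SOURCE A (Python) =====
-- def v_ksztaltna(n):
--     tablica = []
--     polowa = n // 2
--     for i in range(polowa, 0, -1):
--         tablica.append(i)
--     for i in range(0, n - polowa):
--         tablica.append(i)
--     return tablica
-- ===== SOURCE B (Python) =====
-- def v_ksztaltna(n):
--     # Peel the V from both ends: repeatedly strip the outermost pair
--     # (m//2 on the left, (m+1)//2 - 1 on the right) while shrinking m by 2,
--     # then stitch left + core + reversed right.
--     left, right = [], []
--     m = n
--     while m >= 2: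
--         left.append(m // 2)
--         right.append((m + 1) // 2 - 1)
--         m -= 2
--     core = [0] if m == 1 else []
--     return left + core + right[::-1]
-- ===== Notes on version B (the rewrite author's own statement) =====
-- stated objective: alternative
-- what changed: Instead of two directional range loops, B peels the V from both ends: a while loop strips the outermost pair (the floor half on the left, one less than the ceiling half on the right) into two accumulators while shrinking the count by a pair, then stitches left + core + reversed right.
import Mathlib
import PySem

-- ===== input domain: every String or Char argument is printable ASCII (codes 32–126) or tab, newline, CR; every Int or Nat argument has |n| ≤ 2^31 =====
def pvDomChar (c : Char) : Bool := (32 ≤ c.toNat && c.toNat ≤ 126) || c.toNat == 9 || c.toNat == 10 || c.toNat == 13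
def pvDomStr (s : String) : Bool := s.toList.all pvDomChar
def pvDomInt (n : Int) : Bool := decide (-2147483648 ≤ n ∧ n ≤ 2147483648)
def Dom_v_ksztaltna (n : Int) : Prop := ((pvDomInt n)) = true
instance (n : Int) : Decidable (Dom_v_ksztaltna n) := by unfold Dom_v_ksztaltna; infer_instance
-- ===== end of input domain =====

-- B builds the V by peeling the outermost pair off both ends into two accumulators
-- and stitching left + core + reversed right (objective: alternative).

-- ===== PORT A =====
def v_ksztaltna (n : Int) : List Int :=
  let polowa := PySem.Int.floordiv n 2
  let tablica := (PySem.List.pyRange polowa 0 (-1)).foldl (fun acc i => acc ++ [i]) []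
  (PySem.List.pyRange 0 (n - polowa) 1).foldl (fun acc i => acc ++ [i]) tablica

-- ===== PORT B =====
-- the while loop: strip m//2 into left, (m+1)//2 - 1 into right, m -= 2
def vPeel (m : Int) (left right : List Int) : List Int × List Int × Int :=
  if 2 ≤ m then
    vPeel (m - 2) (left ++ [PySem.Int.floordiv m 2]) (right ++ [PySem.Int.floordiv (m + 1) 2 - 1])
  else (left, right, m)
termination_by m.toNat
decreasing_by omega

def v_ksztaltna_alt (n : Int) : List Int :=
  let res := vPeel n [] []
  res.1 ++ (if res.2.2 = 1 then [0] else []) ++ res.2.1.reverse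

-- ===== PRECONDITION & SPEC =====
def Spec_v_ksztaltna (n : Int) (out : List Int) : Prop := out = v_ksztaltna_alt n
instance (n : Int) (out : List Int) : Decidable (Spec_v_ksztaltna n out) := by unfold Spec_v_ksztaltna; infer_instance

-- ===== CLAIM (what is proved, stated in full; the proofs are below) =====
def Claim_equal_v_ksztaltna : Prop := ∀ (n : Int), Dom_v_ksztaltna n → Spec_v_ksztaltna n (v_ksztaltna n)

-- ===== LEMMAS AND PROOFS =====
lemma foldl_append_id (l : List Int) (init : List Int) :
    l.foldl (fun acc i => acc ++ [i]) init = init ++ l := by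
  induction l generalizing init with
  | nil => simp
  | cons x xs ih => simp [List.foldl, ih]

-- A in closed form: countdown range then count-up range
lemma A_closed (n : Int) :
    v_ksztaltna n =
      PySem.List.pyRange (n / 2) 0 (-1) ++ PySem.List.pyRange 0 (n - n / 2) 1 := by
  unfold v_ksztaltna
  have hfd : PySem.Int.floordiv n 2 = n / 2 :=
    PySem.Int.floordiv_eq_ediv_of_pos (by omega)
  rw [foldl_append_id, foldl_append_id, hfd]
  simp

lemma A_nonpos (n : Int) (h : n ≤ 0) : v_ksztaltna n = [] := by
  rw [A_closed,
      PySem.List.pyRange_neg_one_eq_nil (by omega : n / 2 ≤ 0),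
      PySem.List.pyRange_one_eq_nil (by omega : n - n / 2 ≤ 0)]
  simp

lemma A_one : v_ksztaltna 1 = [0] := by
  rw [A_closed]
  have e1 : PySem.List.pyRange ((1:Int) / 2) 0 (-1) = [] :=
    PySem.List.pyRange_neg_one_eq_nil (by norm_num)
  have e2 : PySem.List.pyRange 0 ((1:Int) - 1 / 2) 1 = [0] := by
    rw [show (1:Int) - 1 / 2 = 0 + 1 by norm_num]
    exact PySem.List.pyRange_one_singleton 0
  rw [e1, e2]; norm_num

-- one peel step of A's value
lemma A_step (n : Int) (h2 : 2 ≤ n) :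
    v_ksztaltna n = [n / 2] ++ v_ksztaltna (n - 2) ++ [(n + 1) / 2 - 1] := by
  rw [A_closed, A_closed]
  have hdesc : PySem.List.pyRange (n / 2) 0 (-1) =
      n / 2 :: PySem.List.pyRange (n / 2 - 1) 0 (-1) :=
    PySem.List.pyRange_neg_one_cons (by omega)
  have hd2 : (n - 2) / 2 = n / 2 - 1 := by omega
  have hasc : PySem.List.pyRange 0 (n - n / 2) 1 =
      PySem.List.pyRange 0 (n - n / 2 - 1) 1 ++ [n - n / 2 - 1] := by
    rw [PySem.List.pyRange_one_append 0 (n - n / 2 - 1) (n - n / 2) (by omega) (by omega)]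
    rw [PySem.List.pyRange_one_cons (by omega : n - n / 2 - 1 < n - n / 2),
        PySem.List.pyRange_one_eq_nil (by omega : n - n / 2 ≤ n - n / 2 - 1 + 1)]
  have hr : (n + 1) / 2 - 1 = n - n / 2 - 1 := by omega
  rw [hdesc, hd2, show n - 2 - (n / 2 - 1) = n - n / 2 - 1 by omega, hasc, hr]
  simp

-- loop invariant: assembling vPeel's state yields left ++ A's value ++ reversed right
lemma peel_assemble : ∀ (k : Nat) (m : Int), m.toNat = k → ∀ (left right : List Int),
    (vPeel m left right).1 ++ (if (vPeel m left right).2.2 = 1 then [0] else [])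
      ++ (vPeel m left right).2.1.reverse
    = left ++ v_ksztaltna m ++ right.reverse := by
  intro k
  induction k using Nat.strong_induction_on with
  | _ k ih =>
    intro m hm left right
    by_cases h2 : 2 ≤ m
    · have hf2 : PySem.Int.floordiv m 2 = m / 2 :=
        PySem.Int.floordiv_eq_ediv_of_pos (by omega)
      have hf1 : PySem.Int.floordiv (m + 1) 2 = (m + 1) / 2 :=
        PySem.Int.floordiv_eq_ediv_of_pos (by omega)
      rw [vPeel, if_pos h2,
          ih (m - 2).toNat (by omega) (m - 2) rfl _ _,
          A_step m h2, hf2, hf1]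
      simp
    · rw [vPeel, if_neg h2]
      by_cases h1 : m = 1
      · subst h1; rw [A_one]; simp
      · rw [A_nonpos m (by omega)]
        simp [h1]

-- ===== VERDICT (by name: the statement is the Claim_ definition above) =====
theorem v_ksztaltna_spec : Claim_equal_v_ksztaltna := by
  intro n _
  unfold Spec_v_ksztaltna v_ksztaltna_alt
  have := peel_assemble n.toNat n rfl [] []
  simp only [List.nil_append, List.reverse_nil, List.append_nil] at this
  exact this.symm
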